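-- pv_equiv track=rewrite | github.com/cestwc/phrase-highlighter | util_tokenize.py | highlight_on_words
-- ===== SOURCE A (Python) =====
-- def highlight_on_words(article_original, highlights_original):
-- 	W = set(highlights_original).intersection(set(article_original))
-- 	ignore_mask = list(map(lambda x: int(x in W), article_original))
--
-- 	# labels = [int(bool(h or not a)) for h, a in zip(ignore_mask, attention_mask)]
-- 	labels = [0] * len(article_original)
--
-- 	# get spans
-- 	starts = []
-- 	ends = []
-- 	running = False
-- 	for i, v in enumerate(ignore_mask):
-- 		if v == 1 and not running:
-- 			starts.append(i)
-- 			running = True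
-- 		elif v == 0 and running:
-- 			ends.append(i - 1)
-- 			running = False
-- 	if running:
-- 		ends.append(i)
-- 		running = False
--
-- 	spans = [e - s + 1 for s, e in zip(starts, ends)]
--
-- 	while W:
-- 		# get longest segment
-- 		segment = spans.index(max(spans))
-- 		k = starts[segment]
-- 		while k < ends[segment] + 1:
-- 			labels[k] = 1
-- 			ignore_mask[k] = 0
-- 			W.discard(article_original[k])
-- 			k += 1
--
-- 		# recalculate spans
-- 		spans = [0] * len(spans)
-- 		for i, (s, e) in enumerate(zip(starts, ends)):
-- 			for v in article_original[s:e+1]: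
-- 				if v in W:
-- 					spans[i] += 1
--
--
-- 	return labels, ignore_mask
-- ===== SOURCE B (Python) =====
-- def highlight_on_words(article_original, highlights_original):
--     n = len(article_original)
--     W = set(highlights_original).intersection(set(article_original))
--     ignore_mask = [1 if x in W else 0 for x in article_original]
--     labels = [0] * n
--
--     # maximal runs of 1s in ignore_mask (same preamble as the original)
--     starts = []
--     ends = []
--     running = False
--     for i, v in enumerate(ignore_mask):
--         if v == 1 and not running:
--             starts.append(i)
--             running = True
--         elif v == 0 and running:
--             ends.append(i - 1)
--             running = False
--     if running:
--         ends.append(n - 1)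
--     segs = list(zip(starts, ends))
--
--     # cnt[si] = number of positions in segment si whose word is still in W (maintained
--     # incrementally, instead of rescanning the article every round);
--     # occ[w] = one segment index per occurrence of w inside any segment
--     cnt = [e - s + 1 for s, e in segs]
--     occ = {}
--     for si, (s, e) in enumerate(segs):
--         for k in range(s, e + 1):
--             occ.setdefault(article_original[k], []).append(si)
--
--     while W:
--         si = cnt.index(max(cnt))
--         s, e = segs[si]
--         for k in range(s, e + 1):
--             labels[k] = 1
--             ignore_mask[k] = 0
--             w = article_original[k]
--             if w in W:
--                 W.discard(w)
--                 for t in occ[w]: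
--                     cnt[t] -= 1
--
--     return labels, ignore_mask
-- ===== Notes on version B (the rewrite author's own statement) =====
-- stated objective: faster
-- what changed: Instead of rescanning the whole article every round to recompute all segment spans, B precomputes a word -> occurrence-segment index once and maintains per-segment counts incrementally, decrementing them when a word is removed from the highlight set.
import Mathlib
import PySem

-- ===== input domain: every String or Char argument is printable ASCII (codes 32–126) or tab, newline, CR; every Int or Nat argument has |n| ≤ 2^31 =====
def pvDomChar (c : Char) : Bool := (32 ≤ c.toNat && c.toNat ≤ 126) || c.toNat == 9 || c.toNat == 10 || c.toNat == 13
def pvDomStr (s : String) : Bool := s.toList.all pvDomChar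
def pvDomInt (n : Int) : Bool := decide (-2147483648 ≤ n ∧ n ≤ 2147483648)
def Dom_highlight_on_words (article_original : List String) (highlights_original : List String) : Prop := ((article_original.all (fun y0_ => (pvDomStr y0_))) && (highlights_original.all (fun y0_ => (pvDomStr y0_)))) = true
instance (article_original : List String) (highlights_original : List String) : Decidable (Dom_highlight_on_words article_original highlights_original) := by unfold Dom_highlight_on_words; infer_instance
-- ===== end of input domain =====

-- B replaces A's per-round O(n) rescan of the article by incrementally maintained
-- per-segment counts driven by a word -> occurrence-segments index (objective: faster).

-- ===== PORT A =====
-- shared preamble helper (identical Python lines in A and B): one step of the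
-- 'for i, v in enumerate(ignore_mask)' run-detection loop, state (starts, ends, running)
def pvSpanStep (st : List Int × List Int × Bool) (iv : Int × Int) : List Int × List Int × Bool :=
  if iv.2 == 1 && !st.2.2 then (st.1 ++ [iv.1], st.2.1, true)
  else if iv.2 == 0 && st.2.2 then (st.1, st.2.1 ++ [iv.1 - 1], false)
  else st

-- inner 'while k < ends[segment] + 1' loop of A (k is a Python int; labels[k] = 1,
-- ignore_mask[k] = 0, W.discard(article_original[k]); pySetD/pyGetD are the total
-- forms — every k reached is a valid index)
def pvA_mark (article : List String) (e : Int) (k : Int)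
    (labels ignore : List Int) (W : PySem.Set String) :
    List Int × List Int × PySem.Set String :=
  if k < e + 1 then
    pvA_mark article e (k + 1) (PySem.List.pySetD labels k 1) (PySem.List.pySetD ignore k 0)
      (PySem.Set.discard W (PySem.List.pyGetD article k ""))
  else (labels, ignore, W)
termination_by (e + 1 - k).toNat
decreasing_by omega

-- 'while W:' loop of A; fuel is a totality guard only — each Python iteration
-- removes at least one word from W, so fuel = |W| suffices (on inputs where the
-- guarded branches would fire, Python's loop does not take them either)
def pvA_loop (article : List String) (starts ends : List Int) (fuel : Nat)
    (labels ignore : List Int) (W : PySem.Set String) (spans : List Int) :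
    List Int × List Int :=
  match fuel with
  | 0 => (labels, ignore)
  | fuel + 1 =>
    if W = [] then (labels, ignore)
    else
      -- segment = spans.index(max(spans)); Python raises on an empty spans, which
      -- cannot happen while W is nonempty — the .getD defaults are unreachable guards
      let m := (PySem.List.max? spans (fun x => x)).getD 0
      let segment := (PySem.List.index? spans m).getD 0
      let s := PySem.List.pyGetD starts (segment : Int) 0
      let e := PySem.List.pyGetD ends (segment : Int) 0
      let r := pvA_mark article e s labels ignore W
      -- recalculate spans: spans = [0]*len(spans); nested for-loops over
      -- enumerate(zip(starts, ends)) and article[s:e+1]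
      let spans' := (PySem.List.enumerate (starts.zip ends)).foldl
        (fun sp ip =>
          (PySem.List.slice article (some ip.2.1) (some (ip.2.2 + 1))).foldl
            (fun sp2 v =>
              if PySem.Set.contains r.2.2 v then
                PySem.List.pySetD sp2 ip.1 (PySem.List.pyGetD sp2 ip.1 0 + 1)
              else sp2)
            sp)
        (List.replicate spans.length (0 : Int))
      pvA_loop article starts ends fuel r.1 r.2.1 r.2.2 spans'

def highlight_on_words (article_original : List String) (highlights_original : List String) :
    List Int × List Int :=
  let W := PySem.Set.inter (PySem.Set.ofList highlights_original) (PySem.Set.ofList article_original)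
  let ignore_mask := article_original.map (fun x => if PySem.Set.contains W x then (1 : Int) else 0)
  let labels := List.replicate article_original.length (0 : Int)
  let st := (PySem.List.enumerate ignore_mask).foldl pvSpanStep ([], [], false)
  let starts := st.1
  -- 'if running: ends.append(i)' — after the loop i = len(ignore_mask) - 1
  let ends := if st.2.2 then st.2.1 ++ [(ignore_mask.length : Int) - 1] else st.2.1
  let spans := (starts.zip ends).map (fun se => se.2 - se.1 + 1)
  pvA_loop article_original starts ends W.length labels ignore_mask W spans

-- ===== PORT B =====
-- 'for k in range(s, e+1)' body of B: mark position k and, if its word is still in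
-- W, remove it and decrement cnt once per occurrence segment recorded in occ
def pvB_markFold (article : List String) (occ : PySem.Dict String (List Int)) (ks : List Int)
    (st : List Int × List Int × PySem.Set String × List Int) :
    List Int × List Int × PySem.Set String × List Int :=
  ks.foldl
    (fun st k =>
      let labels := PySem.List.pySetD st.1 k 1
      let ignore := PySem.List.pySetD st.2.1 k 0
      let w := PySem.List.pyGetD article k ""
      if PySem.Set.contains st.2.2.1 w then
        (labels, ignore, PySem.Set.discard st.2.2.1 w,
          (occ.getD w []).foldl
            (fun c t => PySem.List.pySetD c t (PySem.List.pyGetD c t 0 - 1)) st.2.2.2)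
      else (labels, ignore, st.2.2.1, st.2.2.2))
    st

-- 'while W:' loop of B: picks the segment the same way, but cnt is carried along
-- and updated incrementally (fuel is the same totality guard as in A's port)
def pvB_loop (article : List String) (segs : List (Int × Int)) (occ : PySem.Dict String (List Int))
    (fuel : Nat) (labels ignore : List Int) (W : PySem.Set String) (cnt : List Int) :
    List Int × List Int :=
  match fuel with
  | 0 => (labels, ignore)
  | fuel + 1 =>
    if W = [] then (labels, ignore)
    else
      let m := (PySem.List.max? cnt (fun x => x)).getD 0
      let si := (PySem.List.index? cnt m).getD 0
      let se := segs.getD si (0, 0)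
      let r := pvB_markFold article occ (PySem.List.pyRange se.1 (se.2 + 1)) (labels, ignore, W, cnt)
      pvB_loop article segs occ fuel r.1 r.2.1 r.2.2.1 r.2.2.2

def highlight_on_words_alt (article_original : List String) (highlights_original : List String) :
    List Int × List Int :=
  let n := article_original.length
  let W := PySem.Set.inter (PySem.Set.ofList highlights_original) (PySem.Set.ofList article_original)
  let ignore_mask := article_original.map (fun x => if PySem.Set.contains W x then (1 : Int) else 0)
  let labels := List.replicate n (0 : Int)
  let st := (PySem.List.enumerate ignore_mask).foldl pvSpanStep ([], [], false)
  let starts := st.1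
  let ends := if st.2.2 then st.2.1 ++ [(n : Int) - 1] else st.2.1
  let segs := starts.zip ends
  let cnt := segs.map (fun se => se.2 - se.1 + 1)
  -- occ.setdefault(article_original[k], []).append(si) over enumerate(segs) × range(s, e+1)
  let occ := (PySem.List.enumerate segs).foldl
    (fun d ip =>
      (PySem.List.pyRange ip.2.1 (ip.2.2 + 1)).foldl
        (fun d2 k => d2.modify (PySem.List.pyGetD article_original k "") [] (· ++ [ip.1])) d)
    PySem.Dict.empty
  pvB_loop article_original segs occ W.length labels ignore_mask W cnt

-- ===== PRECONDITION & SPEC =====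
def Spec_highlight_on_words (article_original : List String) (highlights_original : List String) (out : List Int × List Int) : Prop := out = highlight_on_words_alt article_original highlights_original
instance (article_original : List String) (highlights_original : List String) (out : List Int × List Int) : Decidable (Spec_highlight_on_words article_original highlights_original out) := by unfold Spec_highlight_on_words; infer_instance

-- ===== CLAIM (what is proved, stated in full; the proofs are below) =====
def Claim_equal_highlight_on_words : Prop := ∀ (article_original : List String) (highlights_original : List String), Dom_highlight_on_words article_original highlights_original → Spec_highlight_on_words article_original highlights_original (highlight_on_words article_original highlights_original)

-- ===== LEMMAS AND PROOFS =====

-- L0: pyRange of casts is range'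
theorem pvRange_natCast (a k : ℕ) :
    PySem.List.pyRange (a : ℤ) ((a : ℤ) + (k : ℤ)) = (List.range' a k).map (Nat.cast : ℕ → ℤ) := by
  induction k with
  | zero =>
    have h2 : ((List.range' a 0).map (Nat.cast : ℕ → ℤ)) = [] := by simp
    rw [Nat.cast_zero, add_zero, h2, List.eq_nil_iff_forall_not_mem]
    intro x hx
    rw [PySem.List.mem_pyRange_one] at hx
    omega
  | succ k ih =>
    have h1 : (a : ℤ) + (k + 1 : ℕ) = ((a : ℤ) + k) + 1 := by push_cast; ring
    rw [h1, PySem.List.pyRange_one_succ_right (by omega), ih, List.range'_1_concat]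
    simp

-- L3: repeated "+1 at fixed index" fold
theorem pvAddFold {α : Type} (l : List α) (pred : α → Bool) (j : ℕ) (sp : List Int)
    (hj : j < sp.length) :
    l.foldl (fun sp2 v => if pred v then
        PySem.List.pySetD sp2 (j : ℤ) (PySem.List.pyGetD sp2 (j : ℤ) 0 + 1) else sp2) sp
      = sp.set j (sp.getD j 0 + l.countP pred) := by
  induction l generalizing sp with
  | nil =>
    simp only [List.foldl_nil, List.countP_nil, Nat.cast_zero, add_zero]
    rw [List.getD_eq_getElem?_getD, List.getElem?_eq_getElem hj]
    exact (List.set_getElem_self hj).symm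
  | cons x t ih =>
    simp only [List.foldl_cons, List.countP_cons]
    by_cases hx : pred x
    · simp only [hx, if_pos]
      rw [PySem.List.pyGetD_natCast, PySem.List.pySetD_natCast]
      rw [ih _ (by simpa using hj)]
      rw [List.set_set]
      congr 1
      have : (sp.set j (sp.getD j 0 + 1)).getD j 0 = sp.getD j 0 + 1 := by
        rw [List.getD_eq_getElem?_getD, List.getElem?_set_self (by simpa using hj)]
        simp
      rw [this]; push_cast; ring
    · simp only [hx, if_neg, Bool.false_eq_true, not_false_eq_true]
      rw [ih _ hj]; simp

def pvSegKeys (p : Int × Int) : List Int := PySem.List.pyRange p.1 (p.2 + 1)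

def pvSegCnt (article : List String) (W : PySem.Set String) (p : Int × Int) : Int :=
  ((pvSegKeys p).countP (fun k => PySem.Set.contains W (PySem.List.pyGetD article k "")) : ℕ)

def pvSpanMap (article : List String) (W : PySem.Set String) (pairs : List (Int × Int)) : List Int :=
  pairs.map (pvSegCnt article W)

def pvGoodPair (M : List Int) (p : Int × Int) : Prop :=
  0 ≤ p.1 ∧ p.1 ≤ p.2 ∧ p.2 < (M.length : ℤ) ∧
    ∀ k : Int, p.1 ≤ k → k ≤ p.2 → PySem.List.pyGetD M k 0 = 1

-- a good pair in Nat form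
theorem pvGoodPair_nat {n : ℕ} {p : Int × Int} (h : 0 ≤ p.1 ∧ p.1 ≤ p.2 ∧ p.2 < (n : ℤ)) :
    ∃ a b : ℕ, p.1 = (a : ℤ) ∧ p.2 + 1 = (b : ℤ) ∧ a < b ∧ b ≤ n := by
  refine ⟨p.1.toNat, (p.2 + 1).toNat, ?_, ?_, ?_, ?_⟩ <;> omega

-- keys of a good pair, in range' form
theorem pvSegKeys_eq {p : Int × Int} (a b : ℕ) (h1 : p.1 = (a : ℤ))
    (h2 : p.2 + 1 = (b : ℤ)) :
    pvSegKeys p = (List.range' a (b - a)).map (Nat.cast : ℕ → ℤ) := by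
  unfold pvSegKeys
  rcases Nat.lt_or_ge a b with h3 | h3
  · rw [h1, h2, show ((b : ℤ)) = (a : ℤ) + ((b - a : ℕ) : ℤ) by omega]
    exact pvRange_natCast a (b - a)
  · rw [h1, h2, show (b - a) = 0 by omega]
    have h4 : ((List.range' a 0).map (Nat.cast : ℕ → ℤ)) = [] := by simp
    rw [h4, List.eq_nil_iff_forall_not_mem]
    intro x hx
    rw [PySem.List.mem_pyRange_one] at hx
    omega

theorem pvSegKeys_len {p : Int × Int} (a b : ℕ) (h1 : p.1 = (a : ℤ)) (h2 : p.2 + 1 = (b : ℤ)) :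
    (pvSegKeys p).length = b - a := by
  rw [pvSegKeys_eq a b h1 h2]; simp

theorem pvSegKeys_getElem {p : Int × Int} (a b : ℕ) (h1 : p.1 = (a : ℤ)) (h2 : p.2 + 1 = (b : ℤ))
    (i : ℕ) (hi : i < (pvSegKeys p).length) : (pvSegKeys p)[i] = ((a + i : ℕ) : ℤ) := by
  have hh := pvSegKeys_eq a b h1 h2
  have hi' : i < ((List.range' a (b - a)).map (Nat.cast : ℕ → ℤ)).length := by rw [← hh]; exact hi
  rw [List.getElem_of_eq hh hi, List.getElem_map, List.getElem_range']
  norm_num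

-- L2: the slice A reads equals pyGetD mapped over the segment keys
theorem pvSlice_eq (article : List String) {p : Int × Int} (a b : ℕ) (h1 : p.1 = (a : ℤ))
    (h2 : p.2 + 1 = (b : ℤ)) (h3 : a < b) (h4 : b ≤ article.length) :
    PySem.List.slice article (some p.1) (some (p.2 + 1))
      = (pvSegKeys p).map (fun k => PySem.List.pyGetD article k "") := by
  rw [h1, h2, PySem.List.slice_natCast]
  apply List.ext_getElem
  · rw [List.length_map, pvSegKeys_len a b h1 h2]; simp; omega
  · intro i hi1 hi2
    rw [List.getElem_map, pvSegKeys_getElem a b h1 h2 i (by simpa using hi2),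
      PySem.List.pyGetD_natCast]
    simp only [List.getElem_take, List.getElem_drop]
    rw [List.getD_eq_getElem?_getD, List.getElem?_eq_getElem (by simp at hi1; omega)]
    simp

-- count of a fully-highlighted segment is its length
theorem pvSegCnt_full (article : List String) (W : PySem.Set String) {p : Int × Int}
    (hb : 0 ≤ p.1 ∧ p.1 ≤ p.2 ∧ p.2 < (article.length : ℤ))
    (hall : ∀ k : Int, p.1 ≤ k → k ≤ p.2 → PySem.Set.contains W (PySem.List.pyGetD article k "") = true) :
    pvSegCnt article W p = p.2 - p.1 + 1 := by
  obtain ⟨a, b, h1, h2, h3, h4⟩ := pvGoodPair_nat hb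
  unfold pvSegCnt
  rw [List.countP_eq_length.mpr, pvSegKeys_len a b h1 h2]
  · omega
  · intro k hk
    rw [pvSegKeys_eq a b h1 h2] at hk
    simp at hk; obtain ⟨j, hj, rfl⟩ := hk
    exact hall _ (by omega) (by omega)

theorem pvEnum_cons {α : Type} (x : α) (t : List α) (s : ℤ) :
    PySem.List.enumerate (x :: t) s = (s, x) :: PySem.List.enumerate t (s + 1) := rfl

-- L4: A's recalculation loop computes pvSpanMap
theorem pvRecalc_go (article : List String) (W : PySem.Set String) :
    ∀ (tail : List (Int × Int)) (a : ℕ) (pre : List Int), pre.length = a →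
      (∀ p ∈ tail, 0 ≤ p.1 ∧ p.1 ≤ p.2 ∧ p.2 < (article.length : ℤ)) →
      (PySem.List.enumerate tail (a : ℤ)).foldl
        (fun sp ip =>
          (PySem.List.slice article (some ip.2.1) (some (ip.2.2 + 1))).foldl
            (fun sp2 v =>
              if PySem.Set.contains W v then
                PySem.List.pySetD sp2 ip.1 (PySem.List.pyGetD sp2 ip.1 0 + 1)
              else sp2)
            sp)
        (pre ++ List.replicate tail.length 0)
      = pre ++ pvSpanMap article W tail := by
  intro tail
  induction tail with
  | nil => intro a pre hpre hb; simp [pvSpanMap, PySem.List.enumerate]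
  | cons p t ih =>
    intro a pre hpre hb
    rw [pvEnum_cons, List.foldl_cons]
    obtain ⟨a', b', h1, h2, h3, h4⟩ := pvGoodPair_nat (hb p (List.mem_cons_self))
    rw [pvSlice_eq article a' b' h1 h2 h3 h4]
    rw [List.foldl_map]
    dsimp only
    have hlen : a < (pre ++ List.replicate (p :: t).length (0 : Int)).length := by
      simp [hpre]
    rw [pvAddFold _ _ a _ (by simpa using hlen)]
    have hget : (pre ++ List.replicate (p :: t).length (0 : Int)).getD a 0 = 0 := by
      rw [List.getD_eq_getElem?_getD, List.getElem?_append_right (by omega),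
        List.getElem?_replicate]
      simp [hpre]
    have hset : (pre ++ List.replicate (p :: t).length (0 : Int)).set a
        (0 + ((pvSegKeys p).countP (fun k => PySem.Set.contains W (PySem.List.pyGetD article k "")) : ℕ))
        = (pre ++ [pvSegCnt article W p]) ++ List.replicate t.length 0 := by
      rw [List.length_cons, List.replicate_succ, ← hpre, List.set_append_right _ _ (by omega)]
      simp [pvSegCnt]
    rw [hget, hset, show ((a : ℤ) + 1) = (((a + 1 : ℕ)) : ℤ) by push_cast; ring]
    rw [ih (a + 1) (pre ++ [pvSegCnt article W p]) (by simp [hpre])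
      (fun q hq => hb q (List.mem_cons_of_mem _ hq))]
    simp [pvSpanMap]

theorem pvDiscard_not_mem {s : PySem.Set String} {x : String} (h : ¬ s.contains x = true) :
    PySem.Set.discard s x = s := by
  unfold PySem.Set.discard
  apply List.filter_eq_self.mpr
  intro y hy
  have hne : y ≠ x := fun hxy => h (PySem.Set.contains_iff s x |>.mpr (hxy ▸ hy))
  simp [hne]

-- L5: A's inner while-loop and B's for-loop produce the same labels/ignore/W
theorem pvMark_eq (article : List String) (occ : PySem.Dict String (List Int)) :
    ∀ (c : ℕ) (k e : Int), (e + 1 - k).toNat = c →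
    ∀ (labels ignore : List Int) (W : PySem.Set String) (cnt : List Int),
      ((pvB_markFold article occ (PySem.List.pyRange k (e + 1)) (labels, ignore, W, cnt)).1,
        (pvB_markFold article occ (PySem.List.pyRange k (e + 1)) (labels, ignore, W, cnt)).2.1,
        (pvB_markFold article occ (PySem.List.pyRange k (e + 1)) (labels, ignore, W, cnt)).2.2.1)
      = pvA_mark article e k labels ignore W := by
  intro c
  induction c with
  | zero =>
    intro k e hc labels ignore W cnt
    have hk : ¬ k < e + 1 := by omega
    have hr : PySem.List.pyRange k (e + 1) = [] := by
      rw [List.eq_nil_iff_forall_not_mem]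
      intro x hx; rw [PySem.List.mem_pyRange_one] at hx; omega
    rw [hr, pvA_mark]
    simp [pvB_markFold, hk]
  | succ c ih =>
    intro k e hc labels ignore W cnt
    have hk : k < e + 1 := by omega
    rw [PySem.List.pyRange_one_cons hk, pvA_mark]
    simp only [hk, if_pos]
    unfold pvB_markFold
    rw [List.foldl_cons]
    by_cases hw : W.contains (PySem.List.pyGetD article k "") = true
    · simp only [hw, if_pos]
      exact ih (k + 1) e (by omega) _ _ _ _
    · simp only [hw, if_neg, Bool.false_eq_true, not_false_eq_true]
      rw [show W.discard (PySem.List.pyGetD article k "") = W from pvDiscard_not_mem hw]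
      exact ih (k + 1) e (by omega) _ _ _ _

def pvOccList (article : List String) (pairs : List (Int × Int)) : List (String × Int) :=
  (PySem.List.enumerate pairs).flatMap
    (fun ip => (pvSegKeys ip.2).map (fun k => (PySem.List.pyGetD article k "", ip.1)))

-- B's occ dict, characterized: per word, its occurrence segments in order
theorem pvOcc_getD (article : List String) (pairs : List (Int × Int)) (w : String) :
    ((PySem.List.enumerate pairs).foldl
      (fun d ip =>
        (PySem.List.pyRange ip.2.1 (ip.2.2 + 1)).foldl
          (fun d2 k => d2.modify (PySem.List.pyGetD article k "") [] (· ++ [ip.1])) d)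
      PySem.Dict.empty).getD w []
    = ((pvOccList article pairs).filter (fun q => q.1 == w)).map (·.2) := by
  have h1 : ∀ d : PySem.Dict String (List Int),
      (PySem.List.enumerate pairs).foldl
        (fun d ip =>
          (PySem.List.pyRange ip.2.1 (ip.2.2 + 1)).foldl
            (fun d2 k => d2.modify (PySem.List.pyGetD article k "") [] (· ++ [ip.1])) d) d
      = (pvOccList article pairs).foldl (fun d p => d.modify p.1 [] (· ++ [p.2])) d := by
    intro d
    unfold pvOccList
    rw [List.foldl_flatMap]
    apply PySem.List.foldl_congr_mem
    intro acc ip _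
    rw [List.foldl_map]
    dsimp only [pvSegKeys]
  rw [h1, PySem.Dict.getD_foldl_modify_append]
  simp [PySem.Dict.getD_empty]

theorem pvEnum_mem {α : Type} : ∀ (l : List α) (a : ℕ) (q : ℤ × α),
    q ∈ PySem.List.enumerate l (a : ℤ) → ∃ j : ℕ, j < l.length ∧ q.1 = ((a + j : ℕ) : ℤ) := by
  intro l
  induction l with
  | nil => intro a q hq; simp [PySem.List.enumerate] at hq
  | cons x t ih =>
    intro a q hq
    rw [pvEnum_cons, List.mem_cons] at hq
    rcases hq with rfl | hq
    · exact ⟨0, by simp, by simp⟩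
    · obtain ⟨j, hj, hq1⟩ := ih (a + 1) q
        (by rw [show ((a:ℤ) + 1) = ((a+1 : ℕ) : ℤ) by push_cast; ring] at hq; exact hq)
      exact ⟨j + 1, by simp; omega, by rw [hq1]; push_cast; ring⟩

-- L8: the decrement loop, pointwise
theorem pvDecFold : ∀ (ts : List Int) (c : List Int),
    (∀ t ∈ ts, ∃ j : ℕ, t = (j : ℤ)) →
    ((ts.foldl (fun c t => PySem.List.pySetD c t (PySem.List.pyGetD c t 0 - 1)) c).length = c.length ∧
      ∀ j : ℕ, j < c.length →
        (ts.foldl (fun c t => PySem.List.pySetD c t (PySem.List.pyGetD c t 0 - 1)) c).getD j 0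
          = c.getD j 0 - ts.count (j : ℤ)) := by
  intro ts
  induction ts with
  | nil => exact fun c _ => ⟨rfl, fun j hj => by simp⟩
  | cons t rest ih =>
    intro c hts
    obtain ⟨j0, rfl⟩ := hts t List.mem_cons_self
    have hstep : PySem.List.pySetD c ((j0 : ℕ) : ℤ) (PySem.List.pyGetD c ((j0 : ℕ) : ℤ) 0 - 1)
        = c.set j0 (c.getD j0 0 - 1) := by
      rw [PySem.List.pySetD_natCast, PySem.List.pyGetD_natCast]
    rw [List.foldl_cons, hstep]
    obtain ⟨ihlen, ihget⟩ := ih (c.set j0 (c.getD j0 0 - 1))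
      (fun t ht => hts t (List.mem_cons_of_mem _ ht))
    refine ⟨by rw [ihlen]; simp, ?_⟩
    intro j hj
    rw [ihget j (by simpa using hj), List.count_cons]
    by_cases hjj : j = j0
    · subst hjj
      have : (c.set j (c.getD j 0 - 1)).getD j 0 = c.getD j 0 - 1 := by
        rw [List.getD_eq_getElem?_getD, List.getElem?_set_self hj]
        simp
      rw [this]
      simp only [beq_self_eq_true, if_pos]
      push_cast
      ring
    · have : (c.set j0 (c.getD j0 0 - 1)).getD j 0 = c.getD j 0 := by
        rw [List.getD_eq_getElem?_getD, List.getElem?_set_ne (by omega)]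
        rfl
      rw [this]
      have hne : ¬ (((j0 : ℕ) : ℤ) == ((j : ℕ) : ℤ)) = true := by
        simp; omega
      simp only [hne, if_neg, Bool.false_eq_true, not_false_eq_true]
      push_cast
      ring

theorem pvEnumSum {α : Type} (g : α → ℕ) (j : ℕ) : ∀ (l : List α) (a : ℕ),
    ((PySem.List.enumerate l (a : ℤ)).map
      (fun ip => if ip.1 == ((j : ℕ) : ℤ) then g ip.2 else 0)).sum
    = if h : a ≤ j ∧ j - a < l.length then g (l[j - a]'(h.2)) else 0 := by
  intro l
  induction l with
  | nil => intro a; simp [PySem.List.enumerate]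
  | cons x t ih =>
    intro a
    rw [pvEnum_cons, List.map_cons, List.sum_cons,
      show ((a : ℤ) + 1) = ((a + 1 : ℕ) : ℤ) by push_cast; ring, ih (a + 1)]
    by_cases haj : a = j
    · subst haj
      have h2 : ¬ (a + 1 ≤ a ∧ a - (a + 1) < t.length) := by omega
      rw [dif_neg h2]
      have h3 : a ≤ a ∧ a - a < (x :: t).length := by simp
      rw [dif_pos h3]
      simp
    · have h1 : ¬ ((((a : ℕ) : ℤ) == ((j : ℕ) : ℤ)) = true) := by simp; omega
      simp only [h1, if_neg, Bool.false_eq_true, not_false_eq_true, zero_add]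
      by_cases h2 : a + 1 ≤ j ∧ j - (a + 1) < t.length
      · have h3 : a ≤ j ∧ j - a < (x :: t).length := by simp; omega
        rw [dif_pos h2, dif_pos h3]
        have h5 : j - a = (j - (a + 1)) + 1 := by omega
        have h6 : (x :: t)[j - a]'(h3.2) = t[j - (a + 1)]'(h2.2) := by
          simp only [h5, List.getElem_cons_succ]
        rw [h6]
      · have h3 : ¬ (a ≤ j ∧ j - a < (x :: t).length) := by simp at h2 ⊢; omega
        rw [dif_neg h2, dif_neg h3]

theorem pvCountSplit {α : Type} (p q r : α → Bool) : ∀ (l : List α),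
    (∀ x ∈ l, (if p x then 1 else 0) = (if q x then 1 else 0) + (if r x then 1 else 0)) →
    l.countP p = l.countP q + l.countP r := by
  intro l
  induction l with
  | nil => intro _; simp
  | cons x t ih =>
    intro h
    have hx := h x List.mem_cons_self
    rw [List.countP_cons, List.countP_cons, List.countP_cons,
      ih (fun y hy => h y (List.mem_cons_of_mem _ hy))]
    by_cases hp : p x <;> by_cases hq : q x <;> by_cases hr : r x <;>
      simp [hp, hq, hr] at hx ⊢ <;> omega

theorem pvContains_discard (W : PySem.Set String) (w x : String) :
    (W.discard w).contains x = (W.contains x && !(x == w)) := by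
  have hmem : ((W.discard w).contains x = true) ↔ (x ∈ W ∧ x ≠ w) :=
    (PySem.Set.contains_iff _ _).trans (PySem.Set.mem_discard W w x)
  have hW : (W.contains x = true) ↔ x ∈ W := PySem.Set.contains_iff W x
  by_cases hm : x ∈ W
  · by_cases hxw : x = w
    · have l : (W.discard w).contains x = false :=
        Bool.eq_false_iff.mpr (fun hc => (hmem.mp hc).2 hxw)
      rw [l, hW.mpr hm, hxw]
      simp
    · have l : (W.discard w).contains x = true := hmem.mpr ⟨hm, hxw⟩
      have hbw : (x == w) = false := by simpa using hxw
      rw [l, hW.mpr hm, hbw]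
      simp
  · have l : (W.discard w).contains x = false :=
      Bool.eq_false_iff.mpr (fun hc => hm (hmem.mp hc).1)
    have r : W.contains x = false := Bool.eq_false_iff.mpr (fun hc => hm (hW.mp hc))
    rw [l, r]
    simp

-- L7: decrementing through the occurrence index recomputes the counts
theorem pvDec_eq (article : List String) (pairs : List (Int × Int)) (W : PySem.Set String)
    (w : String) (hw : W.contains w = true) :
    (((pvOccList article pairs).filter (fun q => q.1 == w)).map (·.2)).foldl
      (fun c t => PySem.List.pySetD c t (PySem.List.pyGetD c t 0 - 1))
      (pvSpanMap article W pairs)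
    = pvSpanMap article (W.discard w) pairs := by
  set ts := ((pvOccList article pairs).filter (fun q => q.1 == w)).map (·.2) with hts
  have htsnat : ∀ t ∈ ts, ∃ j : ℕ, t = (j : ℤ) := by
    intro t ht
    rw [hts] at ht
    simp only [List.mem_map, List.mem_filter] at ht
    obtain ⟨q, ⟨hq1, _⟩, rfl⟩ := ht
    unfold pvOccList at hq1
    rw [List.mem_flatMap] at hq1
    obtain ⟨ip, hip, hq⟩ := hq1
    rw [List.mem_map] at hq
    obtain ⟨k, _, rfl⟩ := hq
    obtain ⟨j, _, hj⟩ := pvEnum_mem pairs 0 ip (by simpa using hip)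
    exact ⟨0 + j, hj⟩
  obtain ⟨hlen, hget⟩ := pvDecFold ts (pvSpanMap article W pairs) htsnat
  -- count of segment j in ts = occurrences of w in segment j
  have hcount : ∀ (j : ℕ) (hjp : j < pairs.length),
      ts.count ((j : ℕ) : ℤ)
        = (pvSegKeys (pairs[j]'hjp)).countP
            (fun k => PySem.List.pyGetD article k "" == w) := by
    intro j hj
    rw [hts, List.count_eq_countP, List.countP_map]
    have e1 : (List.filter (fun q => q.1 == w) (pvOccList article pairs)).countP
          ((fun x => x == ((j:ℕ):ℤ)) ∘ (·.2))
        = (pvOccList article pairs).countP (fun q => (q.1 == w) && (q.2 == ((j:ℕ):ℤ))) := by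
      rw [List.countP_filter]
      apply List.countP_congr
      intro q _
      simp only [Function.comp_apply]
      by_cases h1 : q.1 == w <;> by_cases h2 : q.2 == ((j:ℕ):ℤ) <;> simp [h1, h2]
    rw [e1]
    unfold pvOccList
    rw [List.countP_flatMap]
    have e2 : ∀ ip ∈ PySem.List.enumerate pairs,
        (List.countP (fun q => (q.1 == w) && (q.2 == ((j:ℕ):ℤ))) ∘
          (fun ip => (pvSegKeys ip.2).map (fun k => (PySem.List.pyGetD article k "", ip.1)))) ip
        = if ip.1 == ((j:ℕ):ℤ) then
            (pvSegKeys ip.2).countP (fun k => PySem.List.pyGetD article k "" == w) else 0 := by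
      intro ip _
      simp only [Function.comp_apply, List.countP_map]
      by_cases hipj : ip.1 == ((j:ℕ):ℤ)
      · rw [if_pos hipj]
        apply List.countP_congr
        intro k _
        simp only [Function.comp_apply, hipj, Bool.and_true]
      · rw [if_neg (by simpa using hipj)]
        rw [List.countP_eq_zero]
        intro k _
        simp only [Function.comp_apply]
        simp at hipj ⊢
        intro _
        exact hipj
    rw [List.map_congr_left e2]
    have := pvEnumSum (fun p => (pvSegKeys p).countP (fun k => PySem.List.pyGetD article k "" == w)) j pairs 0
    rw [show ((0:ℕ):ℤ) = (0:ℤ) by simp] at this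
    rw [this]
    have h0 : 0 ≤ j ∧ j - 0 < pairs.length := ⟨Nat.zero_le _, by omega⟩
    rw [dif_pos h0]
    simp
  -- assemble, pointwise
  apply List.ext_getElem
  · rw [hlen]; simp only [pvSpanMap, List.length_map]
  · intro i h1 h2
    have hi : i < pairs.length := by simp only [pvSpanMap, List.length_map] at h2; omega
    have hgd : ∀ (l : List Int) (h : i < l.length), l[i]'h = l.getD i 0 := by
      intro l h
      rw [List.getD_eq_getElem?_getD, List.getElem?_eq_getElem h]
      rfl
    rw [hgd _ h1, hgd _ h2,
      hget i (by simp only [pvSpanMap, List.length_map]; omega)]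
    have hsm : ∀ (V : PySem.Set String), (pvSpanMap article V pairs).getD i 0 = pvSegCnt article V (pairs[i]'hi) := by
      intro V
      rw [List.getD_eq_getElem?_getD]
      unfold pvSpanMap
      rw [List.getElem?_map, List.getElem?_eq_getElem hi]
      rfl
    rw [hsm, hsm, hcount i hi]
    -- countP split: contains W = contains (W.discard w) + (== w) on keys
    unfold pvSegCnt
    have hsplit := pvCountSplit
      (fun k => W.contains (PySem.List.pyGetD article k ""))
      (fun k => (W.discard w).contains (PySem.List.pyGetD article k ""))
      (fun k => PySem.List.pyGetD article k "" == w)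
      (pvSegKeys (pairs[i]'hi))
      (by
        intro k _
        dsimp only
        simp only [pvContains_discard]
        by_cases hkw : PySem.List.pyGetD article k "" = w
        · simp [hkw, (PySem.Set.contains_iff W w).mp hw]
        · have : (PySem.List.pyGetD article k "" == w) = false := by simpa using hkw
          simp [this])
    omega

-- L6: through B's marking loop, cnt stays the recomputed per-segment count
theorem pvMarkInv (article : List String) (pairs : List (Int × Int))
    (occ : PySem.Dict String (List Int))
    (hocc : ∀ w, occ.getD w []
      = ((pvOccList article pairs).filter (fun q => q.1 == w)).map (·.2)) :
    ∀ (ks : List Int) (labels ignore : List Int) (W : PySem.Set String) (cnt : List Int),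
      cnt = pvSpanMap article W pairs →
      (pvB_markFold article occ ks (labels, ignore, W, cnt)).2.2.2
        = pvSpanMap article ((pvB_markFold article occ ks (labels, ignore, W, cnt)).2.2.1) pairs := by
  intro ks
  induction ks with
  | nil => intro labels ignore W cnt hcnt; simpa [pvB_markFold] using hcnt
  | cons k t ih =>
    intro labels ignore W cnt hcnt
    unfold pvB_markFold
    rw [List.foldl_cons]
    by_cases hw : W.contains (PySem.List.pyGetD article k "") = true
    · simp only [hw, if_pos]
      exact ih _ _ _ _ (by rw [hocc, hcnt]; exact pvDec_eq article pairs W _ hw)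
    · simp only [hw, if_neg, Bool.false_eq_true, not_false_eq_true]
      exact ih _ _ _ _ hcnt

def pvInv (M : List Int) (a : ℕ) (st : List Int × List Int × Bool) : Prop :=
  (∀ p ∈ st.1.zip st.2.1, pvGoodPair M p) ∧
  (if st.2.2 then
      ∃ (base : List Int) (l : ℕ), st.1 = base ++ [((l : ℕ) : ℤ)] ∧
        base.length = st.2.1.length ∧ l < a ∧
        (∀ k : ℤ, ((l : ℕ) : ℤ) ≤ k → k < ((a : ℕ) : ℤ) → PySem.List.pyGetD M k 0 = 1)
    else st.1.length = st.2.1.length)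

theorem pvZipSnoc (base : List Int) (x : Int) (ys : List Int) (h : base.length = ys.length) :
    (base ++ [x]).zip ys = base.zip ys := by
  conv_lhs => rw [show ys = ys ++ [] by simp]
  rw [List.zip_append h]
  simp

theorem pvZipSnoc2 (base : List Int) (x : Int) (ys : List Int) (y : Int)
    (h : base.length = ys.length) :
    (base ++ [x]).zip (ys ++ [y]) = base.zip ys ++ [(x, y)] := by
  rw [List.zip_append h]
  rfl

theorem pvNotRun {M : List Int} {l : ℕ} (h : PySem.List.pyGetD M ((l : ℕ) : ℤ) 0 = 1) :
    l < M.length := by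
  by_contra hge
  rw [PySem.List.pyGetD_natCast, List.getD_eq_getElem?_getD,
    List.getElem?_eq_none (by omega)] at h
  simp at h

theorem pvScan_go (M : List Int) (hM : ∀ v ∈ M, v = 0 ∨ v = 1) :
    ∀ (t : List Int) (a : ℕ), M.drop a = t → ∀ st, pvInv M a st →
      pvInv M M.length ((PySem.List.enumerate t (a : ℤ)).foldl pvSpanStep st) := by
  intro t
  induction t with
  | nil =>
    intro a hdrop st hinv
    have ha : M.length ≤ a := by
      by_contra hlt
      exact (List.ne_nil_of_length_pos (by rw [List.length_drop]; omega)) hdrop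
    obtain ⟨h1, h2⟩ := hinv
    show pvInv M M.length st
    unfold pvInv
    refine ⟨h1, ?_⟩
    by_cases hr : st.2.2
    · rw [if_pos hr] at h2 ⊢
      obtain ⟨base, l, e1, e2, e3, e4⟩ := h2
      have hl : l < M.length := pvNotRun (e4 ((l : ℕ) : ℤ) le_rfl (by exact_mod_cast Int.ofNat_lt.mpr e3))
      exact ⟨base, l, e1, e2, hl, fun k hk1 hk2 => e4 k hk1 (by omega)⟩
    · rwa [if_neg hr] at h2 ⊢
  | cons v t' ih =>
    intro a hdrop st hinv
    have hlt : a < M.length := by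
      by_contra h
      rw [List.drop_eq_nil_of_le (by omega)] at hdrop
      exact List.cons_ne_nil v t' hdrop.symm
    have hMa : M[a]? = some v := by
      have h0 := congrArg (fun l => l[0]?) hdrop
      simpa using h0
    have hdrop' : M.drop (a + 1) = t' := by
      have := congrArg List.tail hdrop
      rwa [List.tail_drop] at this
    rw [pvEnum_cons, List.foldl_cons]
    apply ih (a + 1) hdrop'
    obtain ⟨h1, h2⟩ := hinv
    have hv : v = 0 ∨ v = 1 := hM v (by
      have : M[a]'hlt = v := by
        have := List.getElem?_eq_getElem hlt
        rw [this] at hMa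
        exact Option.some.inj hMa
      rw [← this]
      exact List.getElem_mem hlt)
    have hget1 : PySem.List.pyGetD M ((a : ℕ) : ℤ) 0 = v := by
      rw [PySem.List.pyGetD_natCast, List.getD_eq_getElem?_getD, hMa]
      rfl
    by_cases hr : st.2.2
    · rw [if_pos hr] at h2
      obtain ⟨base, l, e1, e2, e3, e4⟩ := h2
      rcases hv with rfl | rfl
      · -- v = 0, running: close the pair (l, a - 1)
        have hstep : pvSpanStep st ((a : ℤ), 0) = (st.1, st.2.1 ++ [(a : ℤ) - 1], false) := by
          unfold pvSpanStep
          simp [hr]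
        rw [hstep]
        unfold pvInv
        constructor
        · intro p hp
          simp only at hp
          rw [e1, pvZipSnoc2 base _ _ _ e2] at hp
          rcases List.mem_append.mp hp with h | h
          · apply h1
            rw [e1, pvZipSnoc base _ _ e2]
            exact h
          · have hl : l < M.length := pvNotRun (e4 ((l : ℕ) : ℤ) le_rfl (by exact_mod_cast Int.ofNat_lt.mpr e3))
            have hp' : p = (((l : ℕ) : ℤ), ((a : ℕ) : ℤ) - 1) := by simpa using h
            rw [hp']
            refine ⟨by omega, by omega, by push_cast; omega, ?_⟩
            intro k hk1 hk2
            exact e4 k hk1 (by omega)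
        · simp only [if_neg Bool.false_ne_true]
          rw [e1]
          simp [e2]
      · -- v = 1, running: extend the run
        have hstep : pvSpanStep st ((a : ℤ), 1) = st := by
          unfold pvSpanStep
          simp [hr]
        rw [hstep]
        unfold pvInv
        refine ⟨h1, ?_⟩
        rw [if_pos hr]
        refine ⟨base, l, e1, e2, by omega, ?_⟩
        intro k hk1 hk2
        by_cases hka : k < ((a : ℕ) : ℤ)
        · exact e4 k hk1 hka
        · have hk : k = ((a : ℕ) : ℤ) := by push_cast at hk2 ⊢; omega
          rw [hk, hget1]
    · have hrf : st.2.2 = false := by simpa using hr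
      rw [if_neg hr] at h2
      rcases hv with rfl | rfl
      · -- v = 0, not running: nothing changes
        have hstep : pvSpanStep st ((a : ℤ), 0) = st := by
          unfold pvSpanStep
          simp [hrf]
        rw [hstep]
        unfold pvInv
        refine ⟨h1, ?_⟩
        rw [if_neg hr]
        exact h2
      · -- v = 1, not running: open a run at a
        have hstep : pvSpanStep st ((a : ℤ), 1) = (st.1 ++ [(a : ℤ)], st.2.1, true) := by
          unfold pvSpanStep
          simp [hrf]
        rw [hstep]
        unfold pvInv
        constructor
        · intro p hp
          apply h1
          simp only at hp
          rwa [pvZipSnoc _ _ _ h2] at hp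
        · rw [if_pos rfl]
          exact ⟨st.1, a, rfl, h2, by omega, fun k hk1 hk2 => by
            have hk : k = ((a : ℕ) : ℤ) := by omega
            rw [hk, hget1]⟩

-- the run detector produces exactly well-formed segments
theorem pvRuns_spec (M : List Int) (hM : ∀ v ∈ M, v = 0 ∨ v = 1) :
    (∀ p ∈ (((PySem.List.enumerate M).foldl pvSpanStep ([], [], false)).1.zip
      (if ((PySem.List.enumerate M).foldl pvSpanStep ([], [], false)).2.2 then
        ((PySem.List.enumerate M).foldl pvSpanStep ([], [], false)).2.1 ++ [(M.length : ℤ) - 1]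
      else ((PySem.List.enumerate M).foldl pvSpanStep ([], [], false)).2.1)),
      pvGoodPair M p) ∧
    ((PySem.List.enumerate M).foldl pvSpanStep ([], [], false)).1.length
      = (if ((PySem.List.enumerate M).foldl pvSpanStep ([], [], false)).2.2 then
        ((PySem.List.enumerate M).foldl pvSpanStep ([], [], false)).2.1 ++ [(M.length : ℤ) - 1]
      else ((PySem.List.enumerate M).foldl pvSpanStep ([], [], false)).2.1).length := by
  have h0 : pvInv M 0 ([], [], false) := by
    unfold pvInv
    refine ⟨by simp, by simp⟩
  have hfold := pvScan_go M hM M 0 (by simp) ([], [], false) (by exact h0)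
  rw [show ((0 : ℕ) : ℤ) = (0 : ℤ) by simp] at hfold
  set st := (PySem.List.enumerate M).foldl pvSpanStep ([], [], false) with hst
  obtain ⟨h1, h2⟩ := hfold
  by_cases hr : st.2.2
  · rw [if_pos hr] at h2 ⊢
    obtain ⟨base, l, e1, e2, e3, e4⟩ := h2
    constructor
    · intro p hp
      rw [e1, pvZipSnoc2 base _ _ _ e2] at hp
      rcases List.mem_append.mp hp with h | h
      · apply h1
        rw [e1, pvZipSnoc base _ _ e2]
        exact h
      · have hp' : p = (((l : ℕ) : ℤ), (M.length : ℤ) - 1) := by simpa using h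
        rw [hp']
        refine ⟨by omega, by push_cast; omega, by push_cast; omega, ?_⟩
        intro k hk1 hk2
        exact e4 k hk1 (by push_cast at hk2 ⊢; omega)
    · rw [e1]
      simp [e2]
  · rw [if_neg hr] at h2 ⊢
    exact ⟨h1, h2⟩

-- L10: the two while-loops agree, step by step
theorem pvLoop_eq (article : List String) (starts ends : List Int)
    (occ : PySem.Dict String (List Int))
    (hlen : starts.length = ends.length)
    (hb : ∀ p ∈ starts.zip ends, 0 ≤ p.1 ∧ p.1 ≤ p.2 ∧ p.2 < (article.length : ℤ))
    (hocc : ∀ w, occ.getD w []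
      = ((pvOccList article (starts.zip ends)).filter (fun q => q.1 == w)).map (·.2)) :
    ∀ (fuel : ℕ) (labels ignore : List Int) (W : PySem.Set String) (cnt : List Int),
      cnt = pvSpanMap article W (starts.zip ends) →
      pvA_loop article starts ends fuel labels ignore W cnt
        = pvB_loop article (starts.zip ends) occ fuel labels ignore W cnt := by
  intro fuel
  induction fuel with
  | zero => intro labels ignore W cnt hcnt; rfl
  | succ fuel ih =>
    intro labels ignore W cnt hcnt
    rw [pvA_loop, pvB_loop]
    by_cases hW : W = []
    · rw [if_pos hW, if_pos hW]
    · rw [if_neg hW, if_neg hW]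
      dsimp only
      -- the selected segment is the same (s, e) pair on both sides
      set m := (PySem.List.max? cnt (fun x => x)).getD 0 with hm
      set si := (PySem.List.index? cnt m).getD 0 with hsi
      have hsel : (PySem.List.pyGetD starts ((si : ℕ) : ℤ) 0, PySem.List.pyGetD ends ((si : ℕ) : ℤ) 0)
          = (starts.zip ends).getD si (0, 0) := by
        by_cases hnil : (starts.zip ends) = []
        · have hs : starts = [] := by
            rcases List.zip_eq_nil_iff.mp hnil with h | h
            · exact h
            · exact List.eq_nil_of_length_eq_zero (by rw [hlen, h]; rfl)
          have he : ends = [] := by rw [← List.length_eq_zero_iff, ← hlen, hs]; rfl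
          rw [hs, he]
          simp [PySem.List.pyGetD_natCast]
        · have hcnt0 : cnt ≠ [] := by
            rw [hcnt]
            unfold pvSpanMap
            simpa using hnil
          have hmax : PySem.List.max? cnt (fun x => x) = some m := by
            cases hmx : PySem.List.max? cnt (fun x => x) with
            | none => exact absurd ((PySem.List.max?_eq_none_iff _ _).mp hmx) hcnt0
            | some v => rw [hm, hmx]; rfl
          have hmem : m ∈ cnt := PySem.List.max?_mem hmax
          have hidx : PySem.List.index? cnt m = some si := by
            cases hix : PySem.List.index? cnt m with
            | none => exact absurd ((PySem.List.index?_eq_none_iff _ _).mp hix) (by simpa using hmem)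
            | some v => rw [hsi, hix]; rfl
          obtain ⟨pre, suf, hsplit, hplen, _⟩ := (PySem.List.index?_eq_some_iff cnt m si).mp hidx
          have hsilen : si < cnt.length := by rw [hsplit, ← hplen]; simp
          have hzlen : si < (starts.zip ends).length := by
            rw [hcnt] at hsilen
            unfold pvSpanMap at hsilen
            simpa using hsilen
          have hslen : si < starts.length := by rw [List.length_zip] at hzlen; omega
          have helen : si < ends.length := by rw [List.length_zip] at hzlen; omega
          have hgd : ∀ (l : List Int) (h : si < l.length),
              PySem.List.pyGetD l ((si : ℕ) : ℤ) 0 = l[si]'h := by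
            intro l h
            rw [PySem.List.pyGetD_natCast, List.getD_eq_getElem?_getD, List.getElem?_eq_getElem h]
            rfl
          rw [hgd starts hslen, hgd ends helen,
            List.getD_eq_getElem?_getD, List.getElem?_eq_getElem hzlen]
          simp [List.getElem_zip]
      set p := (starts.zip ends).getD si (0, 0) with hp
      -- marking agrees on labels / ignore / W
      have hmark := pvMark_eq article occ ((p.2 + 1 - p.1).toNat) p.1 p.2 rfl labels ignore W cnt
      -- A reads s and e through starts/ends; rewrite them to p
      have hsp : PySem.List.pyGetD starts ((si : ℕ) : ℤ) 0 = p.1 := by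
        rw [← hsel]
      have hep : PySem.List.pyGetD ends ((si : ℕ) : ℤ) 0 = p.2 := by
        rw [← hsel]
      rw [hsp, hep]
      set rb := pvB_markFold article occ (PySem.List.pyRange p.1 (p.2 + 1)) (labels, ignore, W, cnt) with hrb
      set ra := pvA_mark article p.2 p.1 labels ignore W with hra
      have h1 : rb.1 = ra.1 := congrArg Prod.fst hmark
      have h2 : rb.2.1 = ra.2.1 := congrArg (fun q => q.2.1) hmark
      have h3 : rb.2.2.1 = ra.2.2 := congrArg (fun q => q.2.2) hmark
      -- B's incremental counts equal A's recomputed spans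
      have hinv := pvMarkInv article (starts.zip ends) occ hocc
        (PySem.List.pyRange p.1 (p.2 + 1)) labels ignore W cnt hcnt
      have hrecalc : (PySem.List.enumerate (starts.zip ends)).foldl
          (fun sp ip =>
            (PySem.List.slice article (some ip.2.1) (some (ip.2.2 + 1))).foldl
              (fun sp2 v =>
                if PySem.Set.contains ra.2.2 v then
                  PySem.List.pySetD sp2 ip.1 (PySem.List.pyGetD sp2 ip.1 0 + 1)
                else sp2)
              sp)
          (List.replicate cnt.length (0 : Int))
          = pvSpanMap article ra.2.2 (starts.zip ends) := by
        have hcl : cnt.length = (starts.zip ends).length := by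
          rw [hcnt]; unfold pvSpanMap; simp
        rw [hcl]
        have := pvRecalc_go article ra.2.2 (starts.zip ends) 0 [] rfl hb
        rw [show ((0 : ℕ) : ℤ) = (0 : ℤ) by simp] at this
        simpa using this
      rw [hrecalc]
      rw [ih ra.1 ra.2.1 ra.2.2 (pvSpanMap article ra.2.2 (starts.zip ends)) rfl]
      rw [← h1, ← h2, ← h3]
      congr 1
      rw [hinv, h3]

theorem pvFinal (article highlights : List String) :
    highlight_on_words article highlights = highlight_on_words_alt article highlights := by
  unfold highlight_on_words highlight_on_words_alt
  dsimp only
  generalize hW0 : PySem.Set.inter (PySem.Set.ofList highlights) (PySem.Set.ofList article) = W0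
  generalize hMdef : article.map (fun x => if W0.contains x = true then (1 : ℤ) else 0) = M
  have hMlen : M.length = article.length := by rw [← hMdef]; simp
  rw [hMlen]
  have hM01 : ∀ v ∈ M, v = 0 ∨ v = 1 := by
    intro v hv
    rw [← hMdef, List.mem_map] at hv
    obtain ⟨x, _, rfl⟩ := hv
    by_cases hc : W0.contains x = true
    · right; rw [if_pos hc]
    · left; rw [if_neg hc]
  have runs := pvRuns_spec M hM01
  rw [hMlen] at runs
  generalize hstdef : (PySem.List.enumerate M).foldl pvSpanStep ([], [], false) = st
  rw [hstdef] at runs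
  obtain ⟨hgood, hlen⟩ := runs
  set endsE := (if st.2.2 then st.2.1 ++ [(article.length : ℤ) - 1] else st.2.1) with hendsE
  set pairs := st.1.zip endsE with hpairs
  -- bounds, and the membership test behind mask = 1
  have hb : ∀ p ∈ pairs, 0 ≤ p.1 ∧ p.1 ≤ p.2 ∧ p.2 < (article.length : ℤ) := by
    intro p hp
    obtain ⟨g1, g2, g3, _⟩ := hgood p hp
    exact ⟨g1, g2, by rw [← hMlen]; exact g3⟩
  have hMk : ∀ k : ℤ, 0 ≤ k → k < (article.length : ℤ) → PySem.List.pyGetD M k 0 = 1 →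
      W0.contains (PySem.List.pyGetD article k "") = true := by
    intro k hk0 hkn h1
    obtain ⟨j, rfl⟩ : ∃ j : ℕ, k = ((j : ℕ) : ℤ) := ⟨k.toNat, by omega⟩
    have hj : j < article.length := by exact_mod_cast hkn
    have hjM : j < M.length := by omega
    rw [PySem.List.pyGetD_natCast] at h1 ⊢
    rw [List.getD_eq_getElem?_getD, List.getElem?_eq_getElem hjM] at h1
    rw [List.getD_eq_getElem?_getD, List.getElem?_eq_getElem hj]
    have h2 : M[j]? = (article[j]?).map (fun x => if W0.contains x = true then (1 : ℤ) else 0) := by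
      rw [← hMdef, List.getElem?_map]
    rw [List.getElem?_eq_getElem hjM, List.getElem?_eq_getElem hj] at h2
    simp only [Option.map_some, Option.some.injEq] at h2
    simp only [Option.getD_some] at h1 ⊢
    rw [h2] at h1
    by_contra hc
    rw [if_neg hc] at h1
    exact absurd h1 (by norm_num)
  -- initial spans = recomputed counts under the full W0
  have hcnt : pairs.map (fun se => se.2 - se.1 + 1) = pvSpanMap article W0 pairs := by
    unfold pvSpanMap
    apply List.map_congr_left
    intro p hp
    obtain ⟨g1, g2, g3, g4⟩ := hgood p hp
    refine (pvSegCnt_full article W0 ⟨g1, g2, by rw [← hMlen]; exact g3⟩ ?_).symm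
    intro k hk1 hk2
    exact hMk k (by omega) (by rw [← hMlen]; omega) (g4 k hk1 hk2)
  exact pvLoop_eq article st.1 endsE _ hlen hb
    (fun w => pvOcc_getD article pairs w) W0.length
    (List.replicate article.length 0) M W0 (pairs.map (fun se => se.2 - se.1 + 1)) hcnt

-- ===== VERDICT (by name: the statement is the Claim_ definition above) =====
theorem highlight_on_words_spec : Claim_equal_highlight_on_words := by
  intro article_original highlights_original _
  unfold Spec_highlight_on_words
  exact pvFinal article_original highlights_original
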